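-- pv_equiv track=rewrite | github.com/trackrat-dev/TrackRat | backend_v2/src/trackrat/config/platform_mappings.py | get_tracks_for_platform
-- ===== SOURCE A (Python) =====
-- NY_PENN_PLATFORMS = {
--     "1": "1 & 2",
--     "2": "1 & 2",
--     "3": "3 & 4",
--     "4": "3 & 4",
--     "5": "5 & 6",
--     "6": "5 & 6",
--     "7": "7 & 8",
--     "8": "7 & 8",
--     "9": "9 & 10",
--     "10": "9 & 10",
--     "11": "11 & 12",
--     "12": "11 & 12",
--     "13": "13 & 14",
--     "14": "13 & 14",
--     "15": "15 & 16",
--     "16": "15 & 16",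
--     "17": "17",  # Single track platform
--     "18": "18 & 19",
--     "19": "18 & 19",
--     "20": "20 & 21",
--     "21": "20 & 21",
-- }
--
-- def get_tracks_for_platform(station_code: str, platform: str) -> list[str]:
--     """
--     Get all tracks that belong to a platform group.
--
--     Args:
--         station_code: Station code (e.g., 'NY')
--         platform: Platform group name (e.g., '7 & 8')
--
--     Returns:
--         List of track numbers/letters in that platform group
--     """
--     tracks = []
--
--     if station_code == "NY":
--         for track, plat in NY_PENN_PLATFORMS.items():
--             if plat == platform:
--                 tracks.append(track)
--
--     # If no tracks found, assume platform is a single track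
--     if not tracks:
--         tracks = [platform]
--
--     return tracks
-- ===== SOURCE B (Python) =====
-- NY_PENN_PLATFORMS = {
--     "1": "1 & 2",
--     "2": "1 & 2",
--     "3": "3 & 4",
--     "4": "3 & 4",
--     "5": "5 & 6",
--     "6": "5 & 6",
--     "7": "7 & 8",
--     "8": "7 & 8",
--     "9": "9 & 10",
--     "10": "9 & 10",
--     "11": "11 & 12",
--     "12": "11 & 12",
--     "13": "13 & 14",
--     "14": "13 & 14",
--     "15": "15 & 16",
--     "16": "15 & 16",
--     "17": "17",
--     "18": "18 & 19",
--     "19": "18 & 19",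
--     "20": "20 & 21",
--     "21": "20 & 21",
-- }
--
-- # Reverse mapping written out directly: platform group -> its tracks.
-- PLATFORM_TO_TRACKS = {
--     "1 & 2": ["1", "2"],
--     "3 & 4": ["3", "4"],
--     "5 & 6": ["5", "6"],
--     "7 & 8": ["7", "8"],
--     "9 & 10": ["9", "10"],
--     "11 & 12": ["11", "12"],
--     "13 & 14": ["13", "14"],
--     "15 & 16": ["15", "16"],
--     "17": ["17"],
--     "18 & 19": ["18", "19"],
--     "20 & 21": ["20", "21"],
-- }
--
--
-- def get_tracks_for_platform(station_code: str, platform: str) -> list[str]: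
--     if station_code == "NY":
--         return list(PLATFORM_TO_TRACKS.get(platform, [platform]))
--     return [platform]
-- ===== Notes on version B (the rewrite author's own statement) =====
-- stated objective: idiomatic
-- what changed: Replaced A's per-call linear scan over NY_PENN_PLATFORMS with a directly written reverse table PLATFORM_TO_TRACKS (platform group -> tracks), so each call is a single dict lookup with [platform] as the default.
import Mathlib
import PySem

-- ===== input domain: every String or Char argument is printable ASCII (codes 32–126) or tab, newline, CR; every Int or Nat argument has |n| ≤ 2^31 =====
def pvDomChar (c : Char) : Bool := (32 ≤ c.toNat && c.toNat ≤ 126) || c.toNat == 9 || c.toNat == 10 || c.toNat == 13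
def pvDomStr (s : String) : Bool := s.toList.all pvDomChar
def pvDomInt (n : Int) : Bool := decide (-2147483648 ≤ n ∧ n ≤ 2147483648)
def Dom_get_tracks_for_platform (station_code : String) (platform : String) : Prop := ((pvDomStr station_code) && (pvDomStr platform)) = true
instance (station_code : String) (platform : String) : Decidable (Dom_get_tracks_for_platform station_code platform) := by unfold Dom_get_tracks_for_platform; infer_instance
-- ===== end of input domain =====

-- B replaces A's per-call linear scan of NY_PENN_PLATFORMS by a directly written
-- reverse table (platform group -> tracks) and a single lookup with default [platform].

-- ===== PORT A =====
def nyPennPlatforms : List (String × String) :=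
  [("1", "1 & 2"), ("2", "1 & 2"), ("3", "3 & 4"), ("4", "3 & 4"),
   ("5", "5 & 6"), ("6", "5 & 6"), ("7", "7 & 8"), ("8", "7 & 8"),
   ("9", "9 & 10"), ("10", "9 & 10"), ("11", "11 & 12"), ("12", "11 & 12"),
   ("13", "13 & 14"), ("14", "13 & 14"), ("15", "15 & 16"), ("16", "15 & 16"),
   ("17", "17"), ("18", "18 & 19"), ("19", "18 & 19"),
   ("20", "20 & 21"), ("21", "20 & 21")]

def get_tracks_for_platform (station_code : String) (platform : String) : List String :=
  let tracks : List String :=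
    if station_code == "NY" then
      nyPennPlatforms.foldl (fun acc kv => if kv.2 == platform then acc ++ [kv.1] else acc) []
    else []
  if tracks = [] then [platform] else tracks

-- ===== PORT B =====
-- the reverse table, a literal dict in Source B
def platformToTracks : PySem.Dict String (List String) :=
  PySem.Dict.mk
    [("1 & 2", ["1", "2"]), ("3 & 4", ["3", "4"]), ("5 & 6", ["5", "6"]),
     ("7 & 8", ["7", "8"]), ("9 & 10", ["9", "10"]), ("11 & 12", ["11", "12"]),
     ("13 & 14", ["13", "14"]), ("15 & 16", ["15", "16"]), ("17", ["17"]),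
     ("18 & 19", ["18", "19"]), ("20 & 21", ["20", "21"])]

def get_tracks_for_platform_alt (station_code : String) (platform : String) : List String :=
  if station_code == "NY" then
    platformToTracks.getD platform [platform]
  else [platform]

-- ===== PRECONDITION & SPEC =====
def Spec_get_tracks_for_platform (station_code : String) (platform : String) (out : List String) : Prop := out = get_tracks_for_platform_alt station_code platform
instance (station_code : String) (platform : String) (out : List String) : Decidable (Spec_get_tracks_for_platform station_code platform out) := by unfold Spec_get_tracks_for_platform; infer_instance

-- ===== CLAIM =====
def Claim_equal_get_tracks_for_platform : Prop := ∀ (station_code : String) (platform : String), Dom_get_tracks_for_platform station_code platform → Spec_get_tracks_for_platform station_code platform (get_tracks_for_platform station_code platform)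

-- ===== LEMMAS AND PROOFS =====
theorem key_lemma (p : String)
    (h1 : "1 & 2" ≠ p) (h2 : "3 & 4" ≠ p) (h3 : "5 & 6" ≠ p) (h4 : "7 & 8" ≠ p)
    (h5 : "9 & 10" ≠ p) (h6 : "11 & 12" ≠ p) (h7 : "13 & 14" ≠ p) (h8 : "15 & 16" ≠ p)
    (h9 : "17" ≠ p) (h10 : "18 & 19" ≠ p) (h11 : "20 & 21" ≠ p) :
    get_tracks_for_platform "NY" p = get_tracks_for_platform_alt "NY" p := by
  rw [get_tracks_for_platform, get_tracks_for_platform_alt]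
  simp [nyPennPlatforms, platformToTracks, PySem.Dict.getD, PySem.Dict.get?,
    h1, h2, h3, h4, h5, h6, h7, h8, h9, h10, h11]

-- ===== VERDICT =====
theorem get_tracks_for_platform_spec : Claim_equal_get_tracks_for_platform := by
  intro sc p _
  unfold Spec_get_tracks_for_platform
  by_cases hsc : sc = "NY"
  · subst hsc
    by_cases h1 : "1 & 2" = p;   · subst h1; decide
    by_cases h2 : "3 & 4" = p;   · subst h2; decide
    by_cases h3 : "5 & 6" = p;   · subst h3; decide
    by_cases h4 : "7 & 8" = p;   · subst h4; decide
    by_cases h5 : "9 & 10" = p;  · subst h5; decide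
    by_cases h6 : "11 & 12" = p; · subst h6; decide
    by_cases h7 : "13 & 14" = p; · subst h7; decide
    by_cases h8 : "15 & 16" = p; · subst h8; decide
    by_cases h9 : "17" = p;      · subst h9; decide
    by_cases h10 : "18 & 19" = p; · subst h10; decide
    by_cases h11 : "20 & 21" = p; · subst h11; decide
    exact key_lemma p h1 h2 h3 h4 h5 h6 h7 h8 h9 h10 h11
  · simp [get_tracks_for_platform, get_tracks_for_platform_alt, hsc]
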